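-- pv_equiv track=rewrite | github.com/AdamZhouSE/pythonHomework | Code/CodeRecords/2742/60761/270903.py | nextx
-- ===== SOURCE A (Python) =====
-- def nextx(version,x):
--     version.sort()
--     for i in range(1,len(version)):
--         if(version[i-1]<=x and version[i]>x):
--             return version[i]
--     if(x>=version[-1]):
--         return int(2**31)
--     else:
--         return min(version)
-- ===== SOURCE B (Python) =====
-- def nextx(version, x):
--     version.sort()
--     if x >= version[-1]:
--         return int(2**31)
--     return min(v for v in version if v > x)
-- ===== Notes on version B (the rewrite author's own statement) =====
-- stated objective: simpler
-- what changed: Replaces A's index loop over adjacent sorted pairs plus a two-way fallback (sentinel vs min(version)) with a single max-guard followed by min over the elements greater than x.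
import Mathlib
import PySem

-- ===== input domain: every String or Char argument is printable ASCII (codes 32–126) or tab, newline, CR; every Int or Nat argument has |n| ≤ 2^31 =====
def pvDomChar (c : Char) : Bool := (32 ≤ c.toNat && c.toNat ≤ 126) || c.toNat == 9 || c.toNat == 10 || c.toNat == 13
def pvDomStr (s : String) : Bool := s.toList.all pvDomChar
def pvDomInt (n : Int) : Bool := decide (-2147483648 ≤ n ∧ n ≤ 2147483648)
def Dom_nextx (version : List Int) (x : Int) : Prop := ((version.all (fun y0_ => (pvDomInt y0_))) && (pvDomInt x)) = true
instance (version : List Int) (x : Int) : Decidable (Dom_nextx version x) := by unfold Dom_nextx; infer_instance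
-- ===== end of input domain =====

-- B replaces A's adjacent-pair index loop and its two-way fallback with a max-guard plus min
-- over the elements greater than x (simpler decomposition). Both sort `version` in place;
-- the equivalence proved is about the return value.


-- ===== PORT A =====
-- the `for i in range(1, len(version))` loop with its early return
def nextxLoopA (s : List Int) (x : Int) : List Int → Option Int
  | [] => none
  | i :: rest =>
    if PySem.List.pyGetD s (i - 1) 0 ≤ x ∧ x < PySem.List.pyGetD s i 0 then
      some (PySem.List.pyGetD s i 0)
    else nextxLoopA s x rest

def nextx (version : List Int) (x : Int) : Int :=
  -- version.sort() : in-place; the sorted list plays the role of `version` below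
  match nextxLoopA (PySem.List.sorted version (fun v => v) false) x
      (PySem.List.pyRange 1 ((PySem.List.sorted version (fun v => v) false).length : Int) 1) with
  | some v => v
  | none =>
    if x ≥ PySem.List.pyGetD (PySem.List.sorted version (fun v => v) false) (-1) 0 then 2 ^ 31
    else (PySem.List.min? (PySem.List.sorted version (fun v => v) false) (fun v => v)).getD 0

-- ===== PORT B =====
def nextx_alt (version : List Int) (x : Int) : Int :=
  if x ≥ PySem.List.pyGetD (PySem.List.sorted version (fun v => v) false) (-1) 0 then 2 ^ 31
  else (PySem.List.min? ((PySem.List.sorted version (fun v => v) false).filter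
    (fun v => decide (x < v))) (fun v => v)).getD 0

-- ===== PRECONDITION & SPEC =====
-- Pre_ excludes the empty list, on which both A and B raise IndexError at version[-1].
def Pre_nextx (version : List Int) (x : Int) : Prop := version ≠ []
instance (version : List Int) (x : Int) : Decidable (Pre_nextx version x) := by
  unfold Pre_nextx; infer_instance

def pvWitness_nextx : List Int × Int := ([3, 1, 2], 1)

def Spec_nextx (version : List Int) (x : Int) (out : Int) : Prop := out = nextx_alt version x
instance (version : List Int) (x : Int) (out : Int) : Decidable (Spec_nextx version x out) := by
  unfold Spec_nextx; infer_instance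

-- ===== CLAIM (what is proved, stated in full; the proofs are below) =====
def Claim_equal_nextx : Prop := ∀ (version : List Int) (x : Int),
  Dom_nextx version x → Pre_nextx version x → Spec_nextx version x (nextx version x)

-- ===== LEMMAS AND PROOFS =====

-- structural reformulation of A's index loop: scan adjacent pairs
def transA (x : Int) : List Int → Option Int
  | a :: b :: t => if a ≤ x ∧ x < b then some b else transA x (b :: t)
  | _ => none

lemma nextxLoopA_eq_transA (s : List Int) (x : Int) :
    ∀ (k : Nat), 1 ≤ k → nextxLoopA s x (PySem.List.pyRange (k : Int) (s.length : Int) 1)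
      = transA x (s.drop (k - 1)) := by
  intro k hk
  by_cases hlt : k < s.length
  · have hrec := nextxLoopA_eq_transA s x (k + 1) (by omega)
    simp only [Nat.add_sub_cancel] at hrec
    have hkm1 : k - 1 < s.length := by omega
    have hdrop : s.drop (k - 1) = s[k - 1] :: s.drop k := by
      have := List.drop_eq_getElem_cons hkm1
      rwa [(by omega : k - 1 + 1 = k)] at this
    have hdrop2 : s.drop k = s[k] :: s.drop (k + 1) := List.drop_eq_getElem_cons hlt
    have hgk : PySem.List.pyGetD s ((k : Int)) 0 = s[k] := by
      rw [PySem.List.pyGetD_natCast]; exact List.getD_eq_getElem s 0 hlt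
    have hgkm : PySem.List.pyGetD s ((k : Int) - 1) 0 = s[k - 1] := by
      have heq : ((k : Int) - 1) = ((k - 1 : Nat) : Int) := by omega
      rw [heq, PySem.List.pyGetD_natCast]
      exact List.getD_eq_getElem s 0 hkm1
    rw [PySem.List.pyRange_one_cons (by exact_mod_cast hlt)]
    have hk1 : ((k : Int) + 1) = ((k + 1 : Nat) : Int) := by push_cast; ring
    rw [nextxLoopA, hk1, hrec, hdrop, hdrop2, transA, hgk, hgkm]
  · rw [PySem.List.pyRange_one_eq_nil (by exact_mod_cast (by omega : s.length ≤ k))]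
    have : (s.drop (k - 1)).length ≤ 1 := by
      simp only [List.length_drop]; omega
    rcases hd : s.drop (k - 1) with _ | ⟨a, _ | _⟩ <;> simp_all [nextxLoopA, transA]
termination_by k => s.length - k

lemma transA_none_of_all_le (x : Int) (s : List Int) (h : ∀ y ∈ s, y ≤ x) :
    transA x s = none := by
  induction s with
  | nil => rfl
  | cons a t ih =>
    cases t with
    | nil => rfl
    | cons b u =>
      rw [transA, if_neg]
      · exact ih (fun y hy => h y (List.mem_cons_of_mem a hy))
      · have hb : b ≤ x := h b (by simp)
        rintro ⟨-, hxb⟩; omega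

lemma transA_none_of_all_gt (x : Int) (s : List Int) (h : ∀ y ∈ s, x < y) :
    transA x s = none := by
  induction s with
  | nil => rfl
  | cons a t ih =>
    cases t with
    | nil => rfl
    | cons b u =>
      rw [transA, if_neg]
      · exact ih (fun y hy => h y (List.mem_cons_of_mem a hy))
      · have ha : x < a := h a (by simp)
        rintro ⟨hax, -⟩; omega

lemma foldl_min_of_le (b : Int) (t : List Int) (h : ∀ y ∈ t, b ≤ y) :
    t.foldl min b = b := by
  induction t with
  | nil => rfl
  | cons y u ih =>
    have hby : min b y = b := min_eq_left (h y (by simp))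
    simp only [List.foldl_cons, hby]
    exact ih (fun z hz => h z (List.mem_cons_of_mem y hz))

lemma transA_eq_min_filter (x : Int) :
    ∀ (t : List Int) (a : Int), (a :: t).Pairwise (· ≤ ·) → a ≤ x →
      x < (a :: t).getLast (by simp) →
      transA x (a :: t) = PySem.List.min? ((a :: t).filter (fun v => decide (x < v))) (fun v => v) := by
  intro t
  induction t with
  | nil =>
    intro a _ hax hlast
    simp only [List.getLast_singleton] at hlast
    omega
  | cons b u ih =>
    intro a hp hax hlast
    have hpb : (b :: u).Pairwise (· ≤ ·) := hp.of_cons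
    have hfa : ((a :: b :: u).filter (fun v => decide (x < v)))
        = ((b :: u).filter (fun v => decide (x < v))) := by
      simp only [List.filter_cons]
      rw [if_neg]; simp; omega
    by_cases hxb : x < b
    · have hall : ∀ y ∈ b :: u, b ≤ y := by
        intro y hy
        rcases List.mem_cons.mp hy with rfl | hy
        · exact le_refl _
        · exact (List.pairwise_cons.mp hpb).1 y hy
      have hfilt : ((b :: u).filter (fun v => decide (x < v))) = b :: u := by
        apply List.filter_eq_self.mpr
        intro y hy; simp only [decide_eq_true_eq]
        exact lt_of_lt_of_le hxb (hall y hy)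
      rw [transA, if_pos ⟨hax, hxb⟩, hfa, hfilt, PySem.List.min?_id_cons,
        foldl_min_of_le b u (fun y hy => hall y (List.mem_cons_of_mem b hy))]
    · have hbx : b ≤ x := by omega
      have hlast' : x < (b :: u).getLast (by simp) := by
        rwa [List.getLast_cons (by simp)] at hlast
      rw [transA, if_neg (by rintro ⟨-, h⟩; exact hxb h), hfa]
      exact ih b hpb hbx hlast'

lemma pairwise_le_getLast : ∀ (s : List Int) (hs : s ≠ []),
    s.Pairwise (· ≤ ·) → ∀ y ∈ s, y ≤ s.getLast hs
  | [a], _, _, y, hy => by simp at hy; simp [hy]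
  | a :: b :: u, _, hp, y, hy => by
    rw [List.getLast_cons (by simp)]
    rcases List.mem_cons.mp hy with rfl | hy'
    · exact (List.pairwise_cons.mp hp).1 _ (List.getLast_mem (by simp))
    · exact pairwise_le_getLast (b :: u) (by simp) hp.of_cons y hy'

lemma head_le_pairwise (a : Int) (t : List Int) (hp : (a :: t).Pairwise (· ≤ ·)) :
    ∀ y ∈ a :: t, a ≤ y := by
  intro y hy
  rcases List.mem_cons.mp hy with rfl | hy'
  · exact le_refl _
  · exact (List.pairwise_cons.mp hp).1 y hy'

-- ===== VERDICT (by name: the statement is the Claim_ definition above) =====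
theorem nextx_spec : Claim_equal_nextx := by
  intro version x _ hpre
  unfold Spec_nextx nextx nextx_alt
  have hsne : PySem.List.sorted version (fun v => v) false ≠ [] := by
    have hperm := PySem.List.sorted_perm version (fun v => v) false
    intro h; exact hpre (List.Perm.nil_eq (h ▸ hperm)).symm
  have hp : (PySem.List.sorted version (fun v => v) false).Pairwise (· ≤ ·) := by
    have := PySem.List.sorted_pairwise version (fun v => v)
    simpa using this
  generalize hgen : PySem.List.sorted version (fun v => v) false = s at hsne hp ⊢
  have hlast : PySem.List.pyGetD s (-1) 0 = s.getLast hsne := by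
    simp [PySem.List.pyGetD_neg_one, hsne]
  have hloop : nextxLoopA s x (PySem.List.pyRange 1 (s.length : Int) 1) = transA x s := by
    have := nextxLoopA_eq_transA s x 1 (le_refl 1)
    simpa using this
  by_cases hge : x ≥ PySem.List.pyGetD s (-1) 0
  · -- all elements ≤ x : the loop finds nothing, both return 2^31
    have hall : ∀ y ∈ s, y ≤ x := fun y hy =>
      le_trans (pairwise_le_getLast s hsne hp y hy) (hlast ▸ hge)
    rw [hloop, transA_none_of_all_le x s hall]
    simp [hge]
  · -- x < last
    have hxlast : x < s.getLast hsne := by rw [← hlast]; omega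
    obtain ⟨a, t, rfl⟩ := List.exists_cons_of_ne_nil hsne
    by_cases hax : a ≤ x
    · -- transition exists
      rw [hloop, transA_eq_min_filter x t a hp hax hxlast]
      have hmem : (a :: t).getLast (by simp) ∈
          (a :: t).filter (fun v => decide (x < v)) :=
        List.mem_filter.mpr ⟨List.getLast_mem _, by simp; omega⟩
      obtain ⟨m, hm⟩ : ∃ m, PySem.List.min? ((a :: t).filter (fun v => decide (x < v)))
          (fun v => v) = some m := by
        rcases h : PySem.List.min? ((a :: t).filter (fun v => decide (x < v)))
            (fun v => v) with _ | m
        · rw [PySem.List.min?_eq_none_iff] at h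
          rw [h] at hmem; simp at hmem
        · exact ⟨m, rfl⟩
      rw [hm]; simp [hge]
    · -- x below the head: loop finds nothing, filter keeps everything
      have hall : ∀ y ∈ a :: t, x < y := fun y hy =>
        lt_of_lt_of_le (by omega) (head_le_pairwise a t hp y hy)
      have hfilt : ((a :: t).filter (fun v => decide (x < v))) = a :: t :=
        List.filter_eq_self.mpr (fun y hy => by simp only [decide_eq_true_eq]; exact hall y hy)
      rw [hloop, transA_none_of_all_gt x (a :: t) hall]
      simp only [hfilt]
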